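-- pv_equiv track=rewrite | github.com/Franco-Lazo-LaSensacion/nonogram | paquete/logica.py | calcular_pistas_v2
-- ===== SOURCE A (Python) =====
-- def calcular_pistas_v2(matriz: list, columna: int) -> list:
--     '''
--     Calcula las pistas por columna, de una matriz.
--
--     Arg: lista -> para recorrer y calcular.
--         columna -> indice columna
--
--     Return: pistas en lista.
--     '''
--
--     pistas = []
--     contador = 0
--
--     for i in range(len(matriz)):
--         if matriz[i][columna] == 1:
--                 contador += 1
--         elif matriz[i][columna] == 0 and contador != 0:
--             pistas.append(contador)
--             contador = 0
--
--     if contador > 0: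
--         pistas.append(contador)
--         contador = 0
--
--     return pistas
-- ===== SOURCE B (Python) =====
-- def calcular_pistas_v2(matriz: list, columna: int) -> list:
--     '''Partition-then-count: split the column at zero cells into segments,
--     then keep the per-segment counts of 1s that are positive.'''
--     col = [fila[columna] for fila in matriz]
--     segmentos = []
--     seg = []
--     for v in col:
--         if v == 0:
--             segmentos.append(seg)
--             seg = []
--         else:
--             seg.append(v)
--     segmentos.append(seg)
--     return [c for c in (s.count(1) for s in segmentos) if c > 0]
-- ===== Notes on version B (the rewrite author's own statement) =====
-- stated objective: alternative
-- what changed: A keeps a running counter and appends inside one stateful scan; B first extracts the column, partitions it at zero cells into segments, then maps count-of-1s over the segments and filters the positive counts.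
import Mathlib
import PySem

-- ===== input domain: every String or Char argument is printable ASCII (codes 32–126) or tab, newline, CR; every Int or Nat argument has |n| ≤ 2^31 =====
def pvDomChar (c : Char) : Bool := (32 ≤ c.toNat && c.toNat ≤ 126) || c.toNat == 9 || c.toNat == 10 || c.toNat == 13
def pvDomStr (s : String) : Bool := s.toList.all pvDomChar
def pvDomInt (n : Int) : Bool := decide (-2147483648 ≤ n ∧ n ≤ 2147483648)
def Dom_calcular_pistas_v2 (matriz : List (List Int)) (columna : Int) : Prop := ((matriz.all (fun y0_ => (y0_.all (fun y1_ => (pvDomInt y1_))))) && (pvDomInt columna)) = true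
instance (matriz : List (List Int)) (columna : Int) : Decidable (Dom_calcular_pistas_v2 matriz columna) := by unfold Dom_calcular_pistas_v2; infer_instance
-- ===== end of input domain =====

-- B replaces A's stateful counter scan by a partition-at-zeros-then-count-ones decomposition (alternative, same cost); equal on all columns in range (Pre_ excludes the IndexError columns).


-- ===== PORT A =====
-- loop body of A: contador += 1 on a 1; flush the counter on a 0 with contador != 0
def pvStepA (st : List Int × Int) (v : Int) : List Int × Int :=
  if v == 1 then (st.1, st.2 + 1)
  else if v == 0 && st.2 != 0 then (st.1 ++ [st.2], 0)
  else st

def calcular_pistas_v2 (matriz : List (List Int)) (columna : Int) : List Int :=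
  -- for i in range(len(matriz)): ... matriz[i][columna] ...  (pyGetD is exact under Pre_)
  let st := (PySem.List.pyRange 0 matriz.length 1).foldl
      (fun st i => pvStepA st (PySem.List.pyGetD (PySem.List.pyGetD matriz i []) columna 0)) ([], 0)
  if st.2 > 0 then st.1 ++ [st.2] else st.1

-- ===== PORT B =====
-- loop body of B: a 0 closes the current segment, anything else is appended to it
def pvStepB (st : List (List Int) × List Int) (v : Int) : List (List Int) × List Int :=
  if v == 0 then (st.1 ++ [st.2], []) else (st.1, st.2 ++ [v])

def calcular_pistas_v2_alt (matriz : List (List Int)) (columna : Int) : List Int :=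
  let col := matriz.map (fun fila => PySem.List.pyGetD fila columna 0)
  let st := col.foldl pvStepB ([], [])
  let segmentos := st.1 ++ [st.2]
  (segmentos.map (fun s => (PySem.List.count s 1 : Int))).filter (fun c => decide (0 < c))

-- ===== PRECONDITION & SPEC =====
-- Pre_ excludes exactly the inputs where Python A raises IndexError: columna out of range for some row
def Pre_calcular_pistas_v2 (matriz : List (List Int)) (columna : Int) : Prop :=
  ∀ fila ∈ matriz, PySem.Raise.InRange fila.length columna
instance (matriz : List (List Int)) (columna : Int) : Decidable (Pre_calcular_pistas_v2 matriz columna) := by unfold Pre_calcular_pistas_v2; infer_instance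

def pvWitness_calcular_pistas_v2 : List (List Int) × Int := ([[1, 0], [1, 1], [0, 1]], 0)

def Spec_calcular_pistas_v2 (matriz : List (List Int)) (columna : Int) (out : List Int) : Prop := out = calcular_pistas_v2_alt matriz columna
instance (matriz : List (List Int)) (columna : Int) (out : List Int) : Decidable (Spec_calcular_pistas_v2 matriz columna out) := by unfold Spec_calcular_pistas_v2; infer_instance

-- ===== CLAIM (what is proved, stated in full; the proofs are below) =====
def Claim_equal_calcular_pistas_v2 : Prop := ∀ (matriz : List (List Int)) (columna : Int), Dom_calcular_pistas_v2 matriz columna → Pre_calcular_pistas_v2 matriz columna → Spec_calcular_pistas_v2 matriz columna (calcular_pistas_v2 matriz columna)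

-- ===== LEMMAS AND PROOFS =====

def pvCnt (s : List Int) : Int := (PySem.List.count s 1 : Int)

lemma pvCnt_nonneg (s : List Int) : 0 ≤ pvCnt s := by
  simp [pvCnt]

lemma pvCnt_nil : pvCnt [] = 0 := by
  simp [pvCnt, PySem.List.count_eq]

lemma pvCnt_append (s : List Int) (v : Int) :
    pvCnt (s ++ [v]) = pvCnt s + (if v = 1 then 1 else 0) := by
  by_cases h : v = 1 <;>
    simp [pvCnt, PySem.List.count_eq, List.count_append, h]

lemma pvFilter_singleton (x : Int) :
    List.filter (fun c => decide (0 < c)) [x] = if 0 < x then [x] else [] := by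
  by_cases h : 0 < x <;> simp [List.filter, h]

-- core invariant: A's (pistas, contador) is determined by B's (segmentos, seg)
lemma pvKey (col : List Int) (segs : List (List Int)) (seg : List Int) :
    (let st := col.foldl pvStepA ((segs.map pvCnt).filter (fun c => decide (0 < c)), pvCnt seg)
     if st.2 > 0 then st.1 ++ [st.2] else st.1)
    = (let st := col.foldl pvStepB (segs, seg)
       ((st.1 ++ [st.2]).map pvCnt).filter (fun c => decide (0 < c))) := by
  induction col generalizing segs seg with
  | nil =>
      simp only [List.foldl_nil, List.map_append, List.map_cons, List.map_nil,
        List.filter_append, pvFilter_singleton, gt_iff_lt]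
      split_ifs with hp <;> simp
  | cons v col ih =>
      simp only [List.foldl_cons]
      by_cases hv0 : v = 0
      · subst hv0
        by_cases hz : pvCnt seg = 0
        · simpa [pvStepA, pvStepB, hz, List.map_append, List.filter_append,
            pvFilter_singleton, pvCnt_nil] using ih (segs ++ [seg]) []
        · have hpos : (0:Int) < pvCnt seg := lt_of_le_of_ne (pvCnt_nonneg seg) (Ne.symm hz)
          simpa [pvStepA, pvStepB, hz, hpos, List.map_append, List.filter_append,
            pvFilter_singleton, pvCnt_nil] using ih (segs ++ [seg]) []
      · by_cases hv1 : v = 1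
        · subst hv1
          have h := ih segs (seg ++ [1])
          rw [pvCnt_append] at h
          simpa [pvStepA, pvStepB] using h
        · have h := ih segs (seg ++ [v])
          rw [pvCnt_append] at h
          simpa [pvStepA, pvStepB, hv0, hv1] using h

-- ===== VERDICT (by name: the statement is the Claim_ definition above) =====
theorem calcular_pistas_v2_spec : Claim_equal_calcular_pistas_v2 := by
  intro matriz columna _ _
  unfold Spec_calcular_pistas_v2 calcular_pistas_v2 calcular_pistas_v2_alt
  rw [PySem.List.foldl_pyRange_zero_pyGetD' matriz ([] : List Int)
      (fun st fila => pvStepA st (PySem.List.pyGetD fila columna 0)) (([], 0) : List Int × Int)]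
  have h := pvKey (matriz.map (fun fila => PySem.List.pyGetD fila columna 0)) [] []
  simp only [List.map_nil, List.filter_nil, pvCnt_nil] at h
  simpa [pvCnt, List.foldl_map] using h
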